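-- pv_equiv track=rewrite | github.com/321nomyzS/PUT-Cryptography-Basics | bbs/bbs_test.py | _join_neighbors
-- ===== SOURCE A (Python) =====
-- def _join_neighbors(lst):
--     result = []
--     current = lst[0]
--     count = 1
--
--     for i in range(1, len(lst)):
--         if lst[i] == current:
--             count += 1
--         else:
--             result.append(str(current) * count)
--             current = lst[i]
--             count = 1
--
--     result.append(str(current) * count)
--     return result
-- ===== SOURCE B (Python) =====
-- def _join_neighbors(lst):
--     n = len(lst)
--     cuts = [i for i in range(n) if i == 0 or lst[i] != lst[i - 1]] + [n]
--     return [str(lst[s]) * (e - s) for s, e in zip(cuts, cuts[1:])]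
-- ===== Notes on version B (the rewrite author's own statement) =====
-- stated objective: alternative
-- what changed: Replaced A's single-pass current/count accumulator loop by two staged passes: first collect the change-point indices (cuts), then build each output string from adjacent index pairs via zip; same O(n) cost.
-- crash fix: On the empty list A raises IndexError (lst[0]) while B returns []. — e.g. on _join_neighbors([]): A raises IndexError, B returns []
import Mathlib
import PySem

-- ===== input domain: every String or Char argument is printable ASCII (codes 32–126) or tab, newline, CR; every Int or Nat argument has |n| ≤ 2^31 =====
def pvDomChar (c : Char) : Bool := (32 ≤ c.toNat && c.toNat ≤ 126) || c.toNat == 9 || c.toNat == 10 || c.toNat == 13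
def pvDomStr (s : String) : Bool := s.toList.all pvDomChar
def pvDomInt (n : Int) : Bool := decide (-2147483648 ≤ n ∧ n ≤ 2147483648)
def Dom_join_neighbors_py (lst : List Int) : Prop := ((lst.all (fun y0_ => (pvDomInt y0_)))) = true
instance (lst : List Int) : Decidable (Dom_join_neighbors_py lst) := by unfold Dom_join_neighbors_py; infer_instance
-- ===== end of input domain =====

-- B replaces A's single-pass current/count accumulator loop by two staged passes: first compute the
-- list of change-point indices ("cuts"), then build each output string from an adjacent index pair.
-- str(c) * n  (n an int)
def strTimes (c : Int) (n : Int) : String :=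
  String.ofList (PySem.List.pyRepeat (PySem.Int.toChars c) n)

-- ===== PORT A =====
-- the for-loop over range(1, len(lst)) carrying (result, current, count), then the final append
def aLoop (rest : List Int) (current : Int) (count : Int) (result : List String) : List String :=
  match rest with
  | [] => result ++ [strTimes current count]
  | x :: xs =>
    if x == current then aLoop xs current (count + 1) result
    else aLoop xs x 1 (result ++ [strTimes current count])

def join_neighbors_py (lst : List Int) : List String :=
  match lst with
  | [] => []          -- outside Pre_: Python raises IndexError at lst[0]
  | h :: t => aLoop t h 1 []

-- ===== PORT B =====
-- cuts = [i for i in range(n) if i == 0 or lst[i] != lst[i-1]] + [n]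
-- return [str(lst[s]) * (e - s) for s, e in zip(cuts, cuts[1:])]
def join_neighbors_py_alt (lst : List Int) : List String :=
  let n : Int := (lst.length : Int)
  let cuts : List Int :=
    ((PySem.List.pyRange 0 n 1).filter
      (fun i => i == 0 || !(PySem.List.pyGetD lst i 0 == PySem.List.pyGetD lst (i - 1) 0))) ++ [n]
  (cuts.zip (PySem.List.slice cuts (some 1) none)).map
    (fun p => strTimes (PySem.List.pyGetD lst p.1 0) (p.2 - p.1))

-- ===== PRECONDITION & SPEC =====
-- Pre_ excludes only the empty list, on which A raises IndexError (lst[0]).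
def Pre_join_neighbors_py (lst : List Int) : Prop := lst ≠ []
instance (lst : List Int) : Decidable (Pre_join_neighbors_py lst) := by unfold Pre_join_neighbors_py; infer_instance
def pvWitness_join_neighbors_py : List Int := [1, 1, 2]

-- On the empty list A raises IndexError (lst[0]) while B returns []; join_neighbors_py_raises below certifies this region lies outside Pre_ and B's value there.
def Raises_join_neighbors_py (lst : List Int) : Prop := lst = []
instance (lst : List Int) : Decidable (Raises_join_neighbors_py lst) := by unfold Raises_join_neighbors_py; infer_instance
def pvRaiseWitness_join_neighbors_py : List Int := []
def pvRaiseWitnessOut_join_neighbors_py : List String := []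

def Spec_join_neighbors_py (lst : List Int) (out : List String) : Prop := out = join_neighbors_py_alt lst
instance (lst : List Int) (out : List String) : Decidable (Spec_join_neighbors_py lst out) := by unfold Spec_join_neighbors_py; infer_instance

-- ===== CLAIM (what is proved, stated in full; the proofs are below) =====
def Claim_equal_join_neighbors_py : Prop := ∀ (lst : List Int), Dom_join_neighbors_py lst → Pre_join_neighbors_py lst → Spec_join_neighbors_py lst (join_neighbors_py lst)
def Claim_raises_join_neighbors_py : Prop := (∀ (lst : List Int), Dom_join_neighbors_py lst → Raises_join_neighbors_py lst → ¬ Pre_join_neighbors_py lst) ∧ (Dom_join_neighbors_py (pvRaiseWitness_join_neighbors_py) ∧ Raises_join_neighbors_py (pvRaiseWitness_join_neighbors_py) ∧ join_neighbors_py_alt (pvRaiseWitness_join_neighbors_py) = pvRaiseWitnessOut_join_neighbors_py)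

-- ===== LEMMAS AND PROOFS =====

-- run decomposition used as the common characterisation of both ports
def runsAux (x : Int) (n : Int) (xs : List Int) : List (Int × Int) :=
  match xs with
  | [] => [(x, n)]
  | y :: ys => if y == x then runsAux x (n + 1) ys else (x, n) :: runsAux y 1 ys

def runsOf : List Int → List (Int × Int)
  | [] => []
  | h :: t => runsAux h 1 t

-- Nat-indexed image of B's staged computation
def cutP (lst : List Int) (i : Nat) : Bool := i == 0 || !(lst.getD i 0 == lst.getD (i - 1) 0)

def cutsN (lst : List Int) : List Nat := (List.range lst.length).filter (cutP lst) ++ [lst.length]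

def resN (lst : List Int) : List String :=
  ((cutsN lst).zip (cutsN lst).tail).map (fun p => strTimes (lst.getD p.1 0) ((p.2 : Int) - (p.1 : Int)))

-- ---- A-side characterisation ----
theorem aLoop_eq_runs (xs : List Int) : ∀ (c n : Int) (res : List String),
    aLoop xs c n res = res ++ (runsAux c n xs).map (fun p => strTimes p.1 p.2) := by
  induction xs with
  | nil => intro c n res; simp [aLoop, runsAux]
  | cons y ys ih =>
    intro c n res
    by_cases h : y = c
    · simp [aLoop, runsAux, h, ih]
    · simp [aLoop, runsAux, h, ih]

theorem A_eq_runsMap (lst : List Int) :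
    join_neighbors_py lst = (runsOf lst).map (fun p => strTimes p.1 p.2) := by
  cases lst with
  | nil => simp [join_neighbors_py, runsOf]
  | cons h t => simp [join_neighbors_py, runsOf, aLoop_eq_runs]

theorem runsAux_rep (h c : Int) (j : Nat) (rest : List Int)
    (hr : ∀ (x : Int) (xs : List Int), rest = x :: xs → x ≠ h) :
    runsAux h c (List.replicate j h ++ rest) = (h, c + (j : Int)) :: runsOf rest := by
  induction j generalizing c with
  | zero =>
    cases rest with
    | nil => simp [runsAux, runsOf]
    | cons x xs =>
      have hx : x ≠ h := hr x xs rfl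
      simp [runsAux, runsOf, hx]
  | succ j ih =>
    have : List.replicate (j + 1) h ++ rest = h :: (List.replicate j h ++ rest) := by
      simp [List.replicate_succ]
    rw [this]
    simp only [runsAux, beq_self_eq_true, if_true]
    rw [ih (c + 1)]
    congr 2
    push_cast
    ring

-- ---- B-side: the port computes resN ----
theorem B_eq_resN (lst : List Int) : join_neighbors_py_alt lst = resN lst := by
  simp only [join_neighbors_py_alt, resN, cutsN]
  rw [PySem.List.slice_from_one]
  rw [PySem.List.pyRange_zero_nat]
  have hp : (fun i : Nat => ((i : Int) == 0 || !(PySem.List.pyGetD lst (i : Int) 0 == PySem.List.pyGetD lst ((i : Int) - 1) 0))) = cutP lst := by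
    funext i
    cases i with
    | zero => simp [cutP]
    | succ j =>
      have h1 : ((j : Int) + 1) - 1 = (j : Int) := by ring
      simp only [cutP, PySem.List.pyGetD_natCast]
      have : ((j + 1 : Nat) : Int) - 1 = ((j : Int)) := by push_cast; ring
      simp only [this, PySem.List.pyGetD_natCast]
      simp
      intro habs
      exact absurd habs (by omega)
  rw [List.filter_map]
  have hpc : ((fun i : Int => (i == 0 || !(PySem.List.pyGetD lst i 0 == PySem.List.pyGetD lst (i - 1) 0))) ∘ (fun k : Nat => (k : Int))) = cutP lst := by
    funext i; exact congrFun hp i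
  rw [hpc]
  have hmap : (List.map (fun k : Nat => (k : Int)) ((List.range lst.length).filter (cutP lst))) ++ [(lst.length : Int)]
      = List.map (fun k : Nat => (k : Int)) ((List.range lst.length).filter (cutP lst) ++ [lst.length]) := by
    simp
  rw [hmap]
  set cs := (List.range lst.length).filter (cutP lst) ++ [lst.length] with hcs
  have htail : (List.map (fun k : Nat => (k : Int)) cs).tail = List.map (fun k : Nat => (k : Int)) cs.tail := by
    cases cs <;> simp
  rw [htail, List.zip_map, List.map_map]
  apply List.map_congr_left
  intro p _
  simp [PySem.List.pyGetD_natCast]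

-- ---- getD on a replicate-prefixed list ----
theorem getL_lt (h : Int) (k : Nat) (rest : List Int) (i : Nat) (hi : i < k) :
    (List.replicate k h ++ rest).getD i 0 = h := by
  rw [List.getD_append _ _ _ _ (by simpa using hi)]
  exact List.getD_replicate h hi

theorem getL_ge (h : Int) (k : Nat) (rest : List Int) (i : Nat) (hi : k ≤ i) :
    (List.replicate k h ++ rest).getD i 0 = rest.getD (i - k) 0 := by
  rw [List.getD_append_right _ _ _ _ (by simpa using hi)]
  simp

-- ---- the change-point indices of replicate k h ++ rest ----
theorem filter_cut_decomp (h : Int) (k : Nat) (hk : 0 < k) (rest : List Int)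
    (hr : ∀ (x : Int) (xs : List Int), rest = x :: xs → x ≠ h) :
    (List.range (k + rest.length)).filter (cutP (List.replicate k h ++ rest))
      = 0 :: ((List.range rest.length).filter (cutP rest)).map (· + k) := by
  set L := List.replicate k h ++ rest with hL
  rw [List.range_add, List.filter_append]
  have hpart1 : (List.range k).filter (cutP L) = [0] := by
    obtain ⟨k', rfl⟩ : ∃ k', k = k' + 1 := ⟨k - 1, by omega⟩
    rw [List.range_succ_eq_map, List.filter_cons]
    have h0 : cutP L 0 = true := by simp [cutP]
    rw [if_pos h0]
    congr 1
    rw [List.filter_map]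
    apply List.map_eq_nil_iff.mpr
    apply List.filter_eq_nil_iff.mpr
    intro j hj
    have hj' : j < k' := List.mem_range.mp hj
    have e1 : L[j + 1]?.getD 0 = h := getL_lt h (k' + 1) rest (j + 1) (by omega)
    have e2 : L[j]?.getD 0 = h := getL_lt h (k' + 1) rest j (by omega)
    simp only [Function.comp_apply, cutP, Nat.succ_eq_add_one]
    simp
    rw [e1, e2]
  have hpart2 : ((List.range rest.length).map (k + ·)).filter (cutP L)
      = ((List.range rest.length).filter (cutP rest)).map (· + k) := by
    rw [List.filter_map]
    have : ∀ j ∈ List.range rest.length, (cutP L ∘ (k + ·)) j = cutP rest j := by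
      intro j hj
      have hjm : j < rest.length := List.mem_range.mp hj
      cases j with
      | zero =>
        obtain ⟨x, xs, rfl⟩ : ∃ x xs, rest = x :: xs := by
          cases rest with
          | nil => simp at hjm
          | cons x xs => exact ⟨x, xs, rfl⟩
        have hx : x ≠ h := hr x xs rfl
        have e1 : L.getD k 0 = x := by
          rw [getL_ge h k _ k le_rfl]; simp
        have e2 : L.getD (k - 1) 0 = h := getL_lt h k _ (k - 1) (by omega)
        have hk0 : (k == 0) = false := by simp; omega
        show cutP L (k + 0) = cutP (x :: xs) 0
        simp only [cutP, Nat.add_zero, e1, e2, hk0]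
        simp [hx]
      | succ j =>
        have e1 : L.getD (k + (j + 1)) 0 = rest.getD (j + 1) 0 := by
          rw [getL_ge h k rest _ (by omega)]; congr 1; omega
        have e2 : L.getD (k + (j + 1) - 1) 0 = rest.getD j 0 := by
          rw [getL_ge h k rest _ (by omega)]; congr 1; omega
        have hk0 : (k + (j + 1) == 0) = false := by simp
        show cutP L (k + (j + 1)) = cutP rest (j + 1)
        simp only [cutP, e1, e2, hk0]
        have : j + 1 - 1 = j := by omega
        simp [this]
    rw [List.filter_congr this]
    apply List.map_congr_left
    intro j _
    simp [Nat.add_comm]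
  rw [hpart1, hpart2]
  simp

theorem cutsN_decomp (h : Int) (k : Nat) (hk : 0 < k) (rest : List Int)
    (hr : ∀ (x : Int) (xs : List Int), rest = x :: xs → x ≠ h) :
    cutsN (List.replicate k h ++ rest) = 0 :: (cutsN rest).map (· + k) := by
  unfold cutsN
  have hlen : (List.replicate k h ++ rest).length = k + rest.length := by simp
  rw [hlen, filter_cut_decomp h k hk rest hr]
  simp [Nat.add_comm]

theorem cutsN_head (rest : List Int) : ∃ cs', cutsN rest = 0 :: cs' := by
  cases rest with
  | nil => exact ⟨[], by simp [cutsN]⟩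
  | cons x xs =>
    unfold cutsN
    rw [show (x :: xs).length = xs.length + 1 from rfl, List.range_succ_eq_map, List.filter_cons]
    have h0 : cutP (x :: xs) 0 = true := by simp [cutP]
    rw [if_pos h0]
    exact ⟨_, rfl⟩

theorem resN_decomp (h : Int) (k : Nat) (hk : 0 < k) (rest : List Int)
    (hr : ∀ (x : Int) (xs : List Int), rest = x :: xs → x ≠ h) :
    resN (List.replicate k h ++ rest) = strTimes h (k : Int) :: resN rest := by
  obtain ⟨cs', hcs⟩ := cutsN_head rest
  unfold resN
  rw [cutsN_decomp h k hk rest hr, hcs]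
  simp only [List.map_cons, List.tail_cons, List.zip_cons_cons, List.map_cons]
  congr 1
  · have e0 : (List.replicate k h ++ rest)[0]?.getD 0 = h := getL_lt h k rest 0 hk
    simp [e0]
  · have hcons : ((0 + k) :: List.map (· + k) cs') = List.map (· + k) (0 :: cs') := by simp
    rw [hcons, List.zip_map, List.map_map]
    apply List.map_congr_left
    intro p _
    obtain ⟨s, e⟩ := p
    have e1 : (List.replicate k h ++ rest)[s + k]?.getD 0 = rest[s]?.getD 0 := by
      have := getL_ge h k rest (s + k) (by omega)
      simpa [Nat.add_sub_cancel] using this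
    simp only [Function.comp_apply, Prod.map]
    congr 1
    push_cast
    ring

-- ---- peeling the first run off a nonempty list ----
theorem peel (hd : Int) (t : List Int) :
    ∃ (k : Nat) (rest : List Int), 0 < k ∧ hd :: t = List.replicate k hd ++ rest ∧
      (∀ (x : Int) (xs : List Int), rest = x :: xs → x ≠ hd) ∧ rest.length < (hd :: t).length := by
  set p : Int → Bool := fun x => x == hd with hp
  set lst := hd :: t with hlst
  refine ⟨(lst.takeWhile p).length, lst.dropWhile p, ?_, ?_, ?_, ?_⟩
  · have : lst.takeWhile p = hd :: t.takeWhile p := by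
      simp [hlst, hp]
    simp [this]
  · have hrep : lst.takeWhile p = List.replicate (lst.takeWhile p).length hd := by
      apply List.eq_replicate_of_mem
      intro b hb
      have := List.mem_takeWhile_imp hb
      simpa [hp] using this
    conv_lhs => rw [← List.takeWhile_append_dropWhile (p := p) (l := lst)]
    rw [← hrep]
  · intro x xs hx
    have hne : lst.dropWhile p ≠ [] := by rw [hx]; simp
    have hhead := List.head_dropWhile_not p hne
    have h1 : (lst.dropWhile p).head? = some x := by rw [hx]; rfl
    have h2 : (lst.dropWhile p).head? = some ((lst.dropWhile p).head hne) := List.head?_eq_some_head hne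
    have hxh : x = (lst.dropWhile p).head hne := by rw [h1] at h2; exact Option.some.inj h2
    have hpx : p x = false := by rw [hxh]; exact hhead
    simpa [hp] using hpx
  · have hlen : (lst.takeWhile p).length + (lst.dropWhile p).length = lst.length := by
      rw [← List.length_append, List.takeWhile_append_dropWhile]
    have htw : 0 < (lst.takeWhile p).length := by
      have : lst.takeWhile p = hd :: t.takeWhile p := by
        simp [hlst, hp]
      simp [this]
    omega

-- ---- main: the run map equals the staged-cuts result ----
theorem runsMap_eq_resN_bounded : ∀ (n : Nat) (lst : List Int), lst.length ≤ n →
    (runsOf lst).map (fun p => strTimes p.1 p.2) = resN lst := by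
  intro n
  induction n with
  | zero =>
    intro lst hlen
    have : lst = [] := List.eq_nil_of_length_eq_zero (by omega)
    subst this
    simp [runsOf, resN, cutsN]
  | succ n ih =>
    intro lst hlen
    cases lst with
    | nil => simp [runsOf, resN, cutsN]
    | cons hd t =>
      obtain ⟨k, rest, hk, hdec, hr, hlt⟩ := peel hd t
      obtain ⟨k', rfl⟩ : ∃ k', k = k' + 1 := ⟨k - 1, by omega⟩
      have ht : t = List.replicate k' hd ++ rest := by
        have : hd :: t = hd :: (List.replicate k' hd ++ rest) := by
          rw [hdec]; simp [List.replicate_succ]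
        exact (List.cons.injEq _ _ _ _).mp this |>.2
      have hruns : runsOf (hd :: t) = (hd, 1 + (k' : Int)) :: runsOf rest := by
        show runsAux hd 1 t = _
        rw [ht, runsAux_rep hd 1 k' rest hr]
      have hres : resN (hd :: t) = strTimes hd ((k' + 1 : Nat) : Int) :: resN rest := by
        rw [hdec]
        exact resN_decomp hd (k' + 1) (by omega) rest hr
      rw [hruns, hres, List.map_cons]
      congr 1
      · congr 1
        push_cast
        ring
      · exact ih rest (by simp only [List.length_cons] at hlt hlen; omega)

-- ===== VERDICT (by name: the statement is the Claim_ definition above) =====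
theorem join_neighbors_py_spec : Claim_equal_join_neighbors_py := by
  intro lst _ _
  unfold Spec_join_neighbors_py
  rw [A_eq_runsMap, B_eq_resN]
  exact runsMap_eq_resN_bounded lst.length lst le_rfl

theorem join_neighbors_py_raises : Claim_raises_join_neighbors_py := by
  unfold Claim_raises_join_neighbors_py
  exact ⟨fun lst _ hr hp => hp hr, by decide⟩

-- self-check: B's value at the raise witness, read off join_neighbors_py_raises
theorem raise_witness_value_ok :
    join_neighbors_py_alt pvRaiseWitness_join_neighbors_py = pvRaiseWitnessOut_join_neighbors_py :=
  join_neighbors_py_raises.2.2.2
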